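-- pv_equiv track=rewrite | github.com/Stephen-99/Wordle_Solver | WordleSolver/src/WordleLibrary/solver.py | ProcessLeastCommonLetters
-- ===== SOURCE A (Python) =====
-- def ProcessLeastCommonLetters(LCLetters: list[list[str]]) -> list[list[str]]:
--     letterCombs = []
--     for letter in LCLetters[0]:
--         if len(LCLetters) > 1:
--             combs = ProcessLeastCommonLetters(LCLetters[1:])
--             for comb in combs:
--                 comb.append(letter)
--                 letterCombs.append(comb)
--         else:
--             letterCombs.append([letter])
--     return letterCombs
-- ===== SOURCE B (Python) =====
-- def ProcessLeastCommonLetters(LCLetters: list[list[str]]) -> list[list[str]]: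
--     current = [[x] for x in LCLetters[-1]]
--     for L in reversed(LCLetters[:-1]):
--         current = [comb + [x] for x in L for comb in current]
--     return current
-- ===== Notes on version B (the rewrite author's own statement) =====
-- stated objective: simpler
-- what changed: Replaces top-down recursion (which recomputes the tail's product once per letter of the head list) with an iterative bottom-up build: seed singletons from the last list, then fold over the earlier lists in reverse with a comprehension.
-- outside the precondition, e.g. on ProcessLeastCommonLetters([]): A raises IndexError, B raises IndexError
import Mathlib
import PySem

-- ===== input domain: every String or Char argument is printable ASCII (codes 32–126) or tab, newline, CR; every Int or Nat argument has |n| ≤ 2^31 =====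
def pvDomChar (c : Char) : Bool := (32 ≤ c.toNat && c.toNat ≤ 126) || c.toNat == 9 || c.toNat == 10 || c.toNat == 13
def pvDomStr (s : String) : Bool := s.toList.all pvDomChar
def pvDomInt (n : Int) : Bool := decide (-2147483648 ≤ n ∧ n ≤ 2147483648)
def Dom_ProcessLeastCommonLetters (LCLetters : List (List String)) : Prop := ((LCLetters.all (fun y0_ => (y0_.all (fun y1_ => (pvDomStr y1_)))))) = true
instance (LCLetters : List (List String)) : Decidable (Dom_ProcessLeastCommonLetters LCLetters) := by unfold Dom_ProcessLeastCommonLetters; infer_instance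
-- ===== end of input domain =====

-- B builds the Cartesian product bottom-up with an iterative fold instead of A's
-- top-down recursion (objective: simpler; same return value on every non-empty input).

-- ===== PORT A =====
-- literal port of A's recursion: for letter in LCLetters[0], if the tail is
-- non-empty recompute the tail's product and append letter to each comb,
-- else emit [letter]. (Python raises IndexError on []; that input is outside Pre_.)
def ProcessLeastCommonLetters (LCLetters : List (List String)) : List (List String) :=
  match LCLetters with
  | [] => []  -- Python: IndexError (LCLetters[0]); excluded by Pre_
  | h :: t =>
    h.foldl (fun letterCombs letter =>
      if t ≠ [] then
        letterCombs ++ (ProcessLeastCommonLetters t).map (fun comb => comb ++ [letter])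
      else
        letterCombs ++ [[letter]]) []

-- ===== PORT B =====
-- literal port of B: seed singletons from the last list, then fold over the
-- earlier lists in reverse; each step is the comprehension
-- [comb + [x] for x in L for comb in current].
def ProcessLeastCommonLetters_alt (LCLetters : List (List String)) : List (List String) :=
  match LCLetters.getLast? with
  | none => []  -- Python: IndexError (LCLetters[-1]); excluded by Pre_
  | some last =>
    let seed := last.map (fun x => [x])
    (LCLetters.dropLast).reverse.foldl
      (fun current L => L.flatMap (fun x => current.map (fun comb => comb ++ [x]))) seed

-- ===== PRECONDITION & SPEC =====
-- Pre_ excludes only the empty outer list, on which both Pythons raise IndexError.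
def Pre_ProcessLeastCommonLetters (LCLetters : List (List String)) : Prop := LCLetters ≠ []
instance (LCLetters : List (List String)) : Decidable (Pre_ProcessLeastCommonLetters LCLetters) := by unfold Pre_ProcessLeastCommonLetters; infer_instance
def pvWitness_ProcessLeastCommonLetters : List (List String) := [["a", "b"], ["c", "d"]]

def Spec_ProcessLeastCommonLetters (LCLetters : List (List String)) (out : List (List String)) : Prop := out = ProcessLeastCommonLetters_alt LCLetters
instance (LCLetters : List (List String)) (out : List (List String)) : Decidable (Spec_ProcessLeastCommonLetters LCLetters out) := by unfold Spec_ProcessLeastCommonLetters; infer_instance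

-- ===== CLAIM (what is proved, stated in full; the proofs are below) =====
def Claim_equal_ProcessLeastCommonLetters : Prop := ∀ (LCLetters : List (List String)), Dom_ProcessLeastCommonLetters LCLetters → Pre_ProcessLeastCommonLetters LCLetters → Spec_ProcessLeastCommonLetters LCLetters (ProcessLeastCommonLetters LCLetters)

-- ===== LEMMAS AND PROOFS =====

-- A's loop body is "acc ++ f letter": the whole fold is acc ++ flatMap.
theorem foldl_append_flatMap {α β : Type} (f : α → List β) :
    ∀ (l : List α) (acc : List β),
      l.foldl (fun acc x => acc ++ f x) acc = acc ++ l.flatMap f := by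
  intro l
  induction l with
  | nil => intro acc; simp
  | cons x xs ih => intro acc; simp [List.foldl, ih, List.flatMap_cons]

theorem A_cons (h : List String) (t : List (List String)) (ht : t ≠ []) :
    ProcessLeastCommonLetters (h :: t) =
      h.flatMap (fun letter => (ProcessLeastCommonLetters t).map (fun comb => comb ++ [letter])) := by
  simp only [ProcessLeastCommonLetters, if_pos ht]
  simpa using foldl_append_flatMap
    (fun letter => (ProcessLeastCommonLetters t).map (fun comb => comb ++ [letter])) h []

theorem A_single (h : List String) :
    ProcessLeastCommonLetters [h] = h.map (fun x => [x]) := by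
  simp only [ProcessLeastCommonLetters]
  have : (fun (letterCombs : List (List String)) (letter : String) =>
      if ([] : List (List String)) ≠ [] then
        letterCombs ++ List.map (fun comb => comb ++ [letter]) ([] : List (List String)) else
        letterCombs ++ [[letter]]) = fun letterCombs letter => letterCombs ++ [[letter]] := by
    funext a b; simp
  rw [this, foldl_append_flatMap (fun letter : String => [[letter]]) h []]
  simp [List.flatMap_def]
  induction h with
  | nil => rfl
  | cons x xs ih => simp [List.map, ih]

theorem B_cons (h : List String) (t : List (List String)) (ht : t ≠ []) :
    ProcessLeastCommonLetters_alt (h :: t) =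
      h.flatMap (fun x => (ProcessLeastCommonLetters_alt t).map (fun comb => comb ++ [x])) := by
  obtain ⟨last, hlast⟩ : ∃ y, t.getLast? = some y := by
    cases t with
    | nil => exact absurd rfl ht
    | cons a as => exact ⟨(a :: as).getLast (by simp), List.getLast?_eq_some_getLast (by simp)⟩
  have hlast' : (h :: t).getLast? = some last := by
    cases t with
    | nil => exact absurd rfl ht
    | cons a as => simpa [List.getLast?_cons_cons] using hlast
  have hdrop : (h :: t).dropLast = h :: t.dropLast := by
    cases t with
    | nil => exact absurd rfl ht
    | cons a as => rfl
  simp only [ProcessLeastCommonLetters_alt, hlast, hlast', hdrop, List.reverse_cons,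
    List.foldl_append, List.foldl_cons, List.foldl_nil]

theorem AB_eq : ∀ (LCLetters : List (List String)), LCLetters ≠ [] →
    ProcessLeastCommonLetters LCLetters = ProcessLeastCommonLetters_alt LCLetters := by
  intro l
  induction l with
  | nil => intro hl; exact absurd rfl hl
  | cons h t ih =>
    intro _
    by_cases ht : t = []
    · subst ht
      rw [A_single]
      simp [ProcessLeastCommonLetters_alt]
    · rw [A_cons h t ht, B_cons h t ht, ih ht]

-- ===== VERDICT (by name: the statement is the Claim_ definition above) =====
theorem ProcessLeastCommonLetters_spec : Claim_equal_ProcessLeastCommonLetters := by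
  intro l _ hpre
  exact AB_eq l hpre
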